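-- pv_equiv track=rewrite | github.com/zaixizhang/STELLA | new_tools/uniprot_query.py | _check_immune_relevance
-- ===== SOURCE A (Python) =====
-- from typing import Dict, List, Optional, Union, Any
--
-- def _check_immune_relevance(entry: Dict[str, str]) -> bool:
--     """Check if protein entry is immune-related based on various fields."""
--     immune_keywords = [
--         'immune', 'immunity', 'immunoglobulin', 'antibody', 'antigen',
--         'nk cell', 'natural killer', 'cytotoxic', 'cd', 'hla', 'mhc',
--         'complement', 'interferon', 'interleukin', 'chemokine', 'cytokine',
--         'toll-like', 'tlr', 'killer cell', 't cell', 'b cell',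
--         'lymphocyte', 'leukocyte', 'macrophage', 'dendritic cell',
--         'inflammation', 'inflammatory', 'defense', 'pathogen',
--         'viral evasion', 'immune evasion', 'immunosuppression',
--         'autoimmune', 'allergy', 'hypersensitivity'
--     ]
--
--     # Check multiple fields for immune-related content
--     fields_to_check = [
--         entry.get('Protein names', ''),
--         entry.get('Function [CC]', ''),
--         entry.get('Keywords', ''),
--         entry.get('Gene Ontology (biological process)', ''),
--         entry.get('Gene Ontology (molecular function)', ''),
--         entry.get('Pathway', '')
--     ]
--
--     combined_text = ' '.join(fields_to_check).lower()
--
--     return any(keyword in combined_text for keyword in immune_keywords)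
-- ===== SOURCE B (Python) =====
-- def _check_immune_relevance(entry):
--     """Check if protein entry is immune-related based on various fields."""
--     immune_keywords = [
--         'immune', 'immunity', 'immunoglobulin', 'antibody', 'antigen',
--         'nk cell', 'natural killer', 'cytotoxic', 'cd', 'hla', 'mhc',
--         'complement', 'interferon', 'interleukin', 'chemokine', 'cytokine',
--         'toll-like', 'tlr', 'killer cell', 't cell', 'b cell',
--         'lymphocyte', 'leukocyte', 'macrophage', 'dendritic cell',
--         'inflammation', 'inflammatory', 'defense', 'pathogen',
--         'viral evasion', 'immune evasion', 'immunosuppression',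
--         'autoimmune', 'allergy', 'hypersensitivity'
--     ]
--
--     field_names = [
--         'Protein names', 'Function [CC]', 'Keywords',
--         'Gene Ontology (biological process)',
--         'Gene Ontology (molecular function)', 'Pathway'
--     ]
--     combined_text = ' '.join(entry.get(name, '') for name in field_names).lower()
--
--     # index the keywords by their first character, then make ONE pass over the
--     # text: at each position only the keywords starting with that character are
--     # tested, as prefixes.
--     by_first = {}
--     for kw in immune_keywords:
--         by_first[kw[0]] = by_first.get(kw[0], []) + [kw]
--
--     for i in range(len(combined_text)):
--         for kw in by_first.get(combined_text[i], []):
--             if combined_text.startswith(kw, i):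
--                 return True
--     return False
-- ===== Notes on version B (the rewrite author's own statement) =====
-- stated objective: alternative
-- what changed: Replaces the keyword-major any(kw in text) substring loop by a dict indexing the keywords by first character plus a single positional pass over the text, testing only first-character-matching keywords as prefixes at each position.
import Mathlib
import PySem

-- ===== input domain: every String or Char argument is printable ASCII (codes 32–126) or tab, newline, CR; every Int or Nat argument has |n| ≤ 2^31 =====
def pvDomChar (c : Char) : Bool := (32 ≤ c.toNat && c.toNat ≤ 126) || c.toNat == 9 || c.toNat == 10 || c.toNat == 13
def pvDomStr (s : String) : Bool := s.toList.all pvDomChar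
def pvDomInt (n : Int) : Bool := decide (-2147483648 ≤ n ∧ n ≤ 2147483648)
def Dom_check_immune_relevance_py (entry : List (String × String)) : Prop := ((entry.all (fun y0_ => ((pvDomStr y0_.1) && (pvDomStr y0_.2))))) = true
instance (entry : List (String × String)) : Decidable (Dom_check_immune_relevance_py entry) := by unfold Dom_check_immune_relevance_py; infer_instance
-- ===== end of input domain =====

-- B replaces the keyword-major `any(kw in text)` substring loop by a first-character
-- index over the keywords and a single positional pass over the text (objective: alternative).

-- ===== PORT A =====
def pvKeywordsA : List String := [
  "immune", "immunity", "immunoglobulin", "antibody", "antigen",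
  "nk cell", "natural killer", "cytotoxic", "cd", "hla", "mhc",
  "complement", "interferon", "interleukin", "chemokine", "cytokine",
  "toll-like", "tlr", "killer cell", "t cell", "b cell",
  "lymphocyte", "leukocyte", "macrophage", "dendritic cell",
  "inflammation", "inflammatory", "defense", "pathogen",
  "viral evasion", "immune evasion", "immunosuppression",
  "autoimmune", "allergy", "hypersensitivity"]

def check_immune_relevance_py (entry : List (String × String)) : Bool :=
  let d : PySem.Dict String String := PySem.Dict.mk entry
  let fields_to_check : List String :=
    [d.getD "Protein names" "",
     d.getD "Function [CC]" "",
     d.getD "Keywords" "",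
     d.getD "Gene Ontology (biological process)" "",
     d.getD "Gene Ontology (molecular function)" "",
     d.getD "Pathway" ""]
  let combined_text := PySem.Str.lower (PySem.Str.join " " fields_to_check)
  pvKeywordsA.any (fun kw => PySem.Str.isIn kw combined_text)

-- ===== PORT B =====
def pvKeywordsB : List String := [
  "immune", "immunity", "immunoglobulin", "antibody", "antigen",
  "nk cell", "natural killer", "cytotoxic", "cd", "hla", "mhc",
  "complement", "interferon", "interleukin", "chemokine", "cytokine",
  "toll-like", "tlr", "killer cell", "t cell", "b cell",
  "lymphocyte", "leukocyte", "macrophage", "dendritic cell",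
  "inflammation", "inflammatory", "defense", "pathogen",
  "viral evasion", "immune evasion", "immunosuppression",
  "autoimmune", "allergy", "hypersensitivity"]

def pvFieldNames : List String :=
  ["Protein names", "Function [CC]", "Keywords",
   "Gene Ontology (biological process)",
   "Gene Ontology (molecular function)", "Pathway"]

-- by_first[kw[0]] = by_first.get(kw[0], []) + [kw]
def pvIndex : PySem.Dict Char (List String) :=
  pvKeywordsB.foldl (fun d kw =>
    let c := kw.toList.headD ' '
    d.insert c (d.getD c [] ++ [kw])) PySem.Dict.empty

-- the positional pass: at position i (text suffix c :: rest) test only the keywords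
-- indexed under c as prefixes (text.startswith(kw, i))
def pvScan : List Char → Bool
  | [] => false
  | c :: rest =>
      (pvIndex.getD c []).any (fun kw => PySem.Chars.startswith (c :: rest) kw.toList)
      || pvScan rest

def check_immune_relevance_py_alt (entry : List (String × String)) : Bool :=
  let d : PySem.Dict String String := PySem.Dict.mk entry
  let combined_text :=
    PySem.Str.lower (PySem.Str.join " " (pvFieldNames.map (fun name => d.getD name "")))
  pvScan combined_text.toList

-- ===== PRECONDITION & SPEC =====
def Spec_check_immune_relevance_py (entry : List (String × String)) (out : Bool) : Prop := out = check_immune_relevance_py_alt entry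
instance (entry : List (String × String)) (out : Bool) : Decidable (Spec_check_immune_relevance_py entry out) := by unfold Spec_check_immune_relevance_py; infer_instance

-- ===== CLAIM (what is proved, stated in full; the proofs are below) =====
def Claim_equal_check_immune_relevance_py : Prop := ∀ (entry : List (String × String)), Dom_check_immune_relevance_py entry → Spec_check_immune_relevance_py entry (check_immune_relevance_py entry)

-- ===== LEMMAS AND PROOFS =====

-- the index built from any keyword list is that list filtered by first character
theorem pvIndex_gen (K : List String) (d : PySem.Dict Char (List String)) (c : Char) :
    (K.foldl (fun d kw =>
      let c := kw.toList.headD ' '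
      d.insert c (d.getD c [] ++ [kw])) d).getD c []
    = d.getD c [] ++ K.filter (fun kw => kw.toList.headD ' ' == c) := by
  induction K generalizing d with
  | nil => simp
  | cons kw K ih =>
      simp only [List.foldl_cons, List.filter_cons, ih]
      rw [PySem.Dict.getD_insert]
      simp only [List.headD_eq_head?_getD]
      by_cases h : kw.toList.head?.getD ' ' = c
      · rw [if_pos h.symm, h, if_pos (by simp)]
        simp
      · rw [if_neg (Ne.symm h), if_neg (by simp [h])]

-- `any` respects pointwise equality on members, and distributes over `||`
theorem pv_any_congr {α : Type} (l : List α) (p q : α → Bool)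
    (h : ∀ x ∈ l, p x = q x) : l.any p = l.any q := by
  induction l with
  | nil => rfl
  | cons a t ih =>
      simp only [List.any_cons, h a (List.mem_cons_self), ih (fun x hx => h x (List.mem_cons_of_mem a hx))]

theorem pv_any_or {α : Type} (l : List α) (p q : α → Bool) :
    l.any (fun x => p x || q x) = (l.any p || l.any q) := by
  induction l with
  | nil => rfl
  | cons a t ih =>
      simp only [List.any_cons, ih]
      cases p a <;> cases q a <;> simp

theorem pvIndex_getD (c : Char) :
    pvIndex.getD c [] = pvKeywordsB.filter (fun kw => kw.toList.headD ' ' == c) := by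
  have := pvIndex_gen pvKeywordsB PySem.Dict.empty c
  simpa [pvIndex] using this

-- a nonempty prefix of c :: rest starts with c
theorem pv_startswith_head (kw : List Char) (c : Char) (rest : List Char)
    (hne : kw ≠ []) (h : PySem.Chars.startswith (c :: rest) kw = true) :
    kw.head?.getD ' ' = c := by
  rw [PySem.Chars.startswith_iff] at h
  cases kw with
  | nil => exact absurd rfl hne
  | cons a t =>
      obtain ⟨u, hu⟩ := h
      simp only [List.cons_append] at hu
      simp [List.cons.injEq] at hu ⊢
      exact hu.1

theorem pv_keywords_nonempty : pvKeywordsB.all (fun kw => !kw.toList.isEmpty) = true := by decide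

-- the filtered any equals the full any, since only matching first characters can be prefixes
theorem pvScan_cons_any (c : Char) (rest : List Char) :
    (pvIndex.getD c []).any (fun kw => PySem.Chars.startswith (c :: rest) kw.toList)
    = pvKeywordsB.any (fun kw => PySem.Chars.startswith (c :: rest) kw.toList) := by
  rw [pvIndex_getD, List.any_filter]
  apply pv_any_congr
  intro kw hkw
  by_cases h : PySem.Chars.startswith (c :: rest) kw.toList = true
  · have hne : kw.toList ≠ [] := by
      have := List.all_eq_true.mp pv_keywords_nonempty kw hkw
      simpa [List.isEmpty_iff] using this
    have := pv_startswith_head kw.toList c rest hne h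
    simp [h, this]
  · simp [Bool.eq_false_iff.mpr h]

-- the positional scan computes the keyword-major substring search
theorem pvScan_eq (cs : List Char) :
    pvScan cs = pvKeywordsB.any (fun kw => PySem.Chars.isIn kw.toList cs) := by
  induction cs with
  | nil =>
      simp only [pvScan]
      symm
      rw [List.any_eq_false]
      intro kw hkw hin
      rw [PySem.Chars.isIn_iff_infix] at hin
      obtain ⟨s, t, hst⟩ := hin
      have hne : kw.toList ≠ [] := by
        have := List.all_eq_true.mp pv_keywords_nonempty kw hkw
        simpa [List.isEmpty_iff] using this
      rcases List.append_eq_nil_iff.mp hst with ⟨h1, h2⟩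
      exact hne (List.append_eq_nil_iff.mp h1).2
  | cons c rest ih =>
      simp only [pvScan, pvScan_cons_any, ih]
      rw [← pv_any_or]
      apply pv_any_congr
      intro kw _
      rw [Bool.eq_iff_iff]
      simp only [Bool.or_eq_true, PySem.Chars.isIn_iff_infix, PySem.Chars.startswith_iff]
      exact List.infix_cons_iff.symm


-- ===== VERDICT (by name: the statement is the Claim_ definition above) =====
theorem check_immune_relevance_py_spec : Claim_equal_check_immune_relevance_py := by
  intro entry _
  unfold Spec_check_immune_relevance_py check_immune_relevance_py check_immune_relevance_py_alt
  simp only [pvFieldNames, List.map_cons, List.map_nil, pvScan_eq]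
  apply pv_any_congr
  intro kw _
  rfl
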